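-- pv_equiv track=rewrite | github.com/xinli2/Infographic | Infographic.py | finding_most_occurrences
-- ===== SOURCE A (Python) =====
-- def finding_most_occurrences(dictionary):
--     small = 0
--     medium = 0
--     large = 0
--     small_dictionary = {}
--     medium_dictionary = {}
--     large_dictionary = {}
--     smallmost = ''
--     mediummost = ''
--     largemost =''
--     for word in dictionary:
--         if len(word) < 5:
--             small += dictionary[word]
--             small_dictionary[word]= dictionary[word]
--
--         elif 4 <len(word) < 8:
--             medium += dictionary[word]
--             medium_dictionary[word] = dictionary[word]
--         elif len(word) >= 8:
--             large += dictionary[word]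
--             large_dictionary[word] = dictionary[word]
--     smallcount = 0
--     smallmost_word = ''
--     for word in small_dictionary:
--         if small_dictionary[word] > smallcount:
--             smallcount = small_dictionary[word]
--             smallmost_word = word
--        # if small_dictionary[word] == smallcount and word not in smallmost_word:
--         #    smallmost_word +=' '+word
--     smallmost = smallmost_word+' ('+str(smallcount)+'x'+') '
--
--     mediumcount  = 0
--     mediummost_word = ''
--     for word in medium_dictionary:
--         if medium_dictionary[word] > mediumcount:
--             mediumcount = medium_dictionary[word]
--             mediummost_word = word
--         #if medium_dictionary[word] == mediumcount and word not in mediummost_word: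
--          #   mediummost_word +=', '+word
--     mediummost = mediummost_word+' ('+str(mediumcount)+'x'+') '
--
--     largecount = 0
--     largemost_word = ''
--     for word in large_dictionary:
--         if large_dictionary[word] > largecount:
--             largecount = large_dictionary[word]
--             largemost_word = word
--         #if large_dictionary[word] == largecount and word not in largemost_word:
--          #   largemost_word +=' '+word
--     largemost = largemost_word+' ('+str(largecount)+'x'+') '
--     small = len(small_dictionary)
--     medium = len(medium_dictionary)
--     large = len(large_dictionary)
--
--     return small, medium, large, smallmost, mediummost, largemost
-- ===== SOURCE B (Python) =====
-- def finding_most_occurrences(dictionary):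
--     sc = mc = lc = 0
--     sb = mb = lb = ('', 0)
--     for word in dictionary:
--         v = dictionary[word]
--         n = len(word)
--         if n < 5:
--             sc += 1
--             if v > sb[1]:
--                 sb = (word, v)
--         elif n < 8:
--             mc += 1
--             if v > mb[1]:
--                 mb = (word, v)
--         else:
--             lc += 1
--             if v > lb[1]:
--                 lb = (word, v)
--     return (sc, mc, lc,
--             sb[0] + ' (' + str(sb[1]) + 'x' + ') ',
--             mb[0] + ' (' + str(mb[1]) + 'x' + ') ',
--             lb[0] + ' (' + str(lb[1]) + 'x' + ') ')
-- ===== Notes on version B (the rewrite author's own statement) =====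
-- stated objective: simpler
-- what changed: One pass over the dict keeping a per-bucket distinct-word count and a running (best_word, best_count) updated on strict >, instead of building three intermediate dictionaries and then scanning each for its maximum.
import Mathlib
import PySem

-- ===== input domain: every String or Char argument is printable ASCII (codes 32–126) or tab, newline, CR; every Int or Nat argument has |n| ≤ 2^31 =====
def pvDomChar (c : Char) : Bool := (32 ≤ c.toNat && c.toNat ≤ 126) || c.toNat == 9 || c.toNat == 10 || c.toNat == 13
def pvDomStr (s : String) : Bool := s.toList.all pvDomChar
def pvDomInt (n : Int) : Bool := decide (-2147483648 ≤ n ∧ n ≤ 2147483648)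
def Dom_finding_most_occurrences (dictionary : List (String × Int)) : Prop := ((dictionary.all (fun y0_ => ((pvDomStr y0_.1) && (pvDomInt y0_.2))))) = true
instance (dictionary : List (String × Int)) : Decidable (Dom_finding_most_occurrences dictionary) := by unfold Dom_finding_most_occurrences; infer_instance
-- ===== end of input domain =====

-- B replaces A's three intermediate bucket dictionaries and three max-finding scans by a single pass
-- keeping, per bucket, a distinct-word count and the running (best_word, best_count); objective: simpler.
-- The argument is a Python dict (here: its items in insertion order); both ports read it through
-- PySem.Dict.ofList, exactly as Python builds the dict.

-- ===== PORT A =====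
-- the loop body of A's first 'for word in dictionary' (running sums and the three bucket dicts)
def fmoStepA (st : Int × Int × Int × PySem.Dict String Int × PySem.Dict String Int × PySem.Dict String Int)
    (p : String × Int) :
    Int × Int × Int × PySem.Dict String Int × PySem.Dict String Int × PySem.Dict String Int :=
  match st, p with
  | (s, m, l, sd, md, ld), (word, v) =>
    if PySem.Str.len word < 5 then (s + v, m, l, sd.insert word v, md, ld)
    else if 4 < PySem.Str.len word ∧ PySem.Str.len word < 8 then (s, m + v, l, sd, md.insert word v, ld)
    else if 8 ≤ PySem.Str.len word then (s, m, l + v, sd, md, ld.insert word v)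
    else (s, m, l, sd, md, ld)

-- A's max-finding scan 'for word in <bucket>_dictionary: if <bucket>_dictionary[word] > count: …'
def fmoScanA (items : List (String × Int)) (init : Int × String) : Int × String :=
  items.foldl (fun cw kv => if kv.2 > cw.1 then (kv.2, kv.1) else cw) init

def finding_most_occurrences (dictionary : List (String × Int)) :
    Int × Int × Int × String × String × String :=
  let r := ((PySem.Dict.ofList dictionary).items).foldl fmoStepA
      (0, 0, 0, PySem.Dict.empty, PySem.Dict.empty, PySem.Dict.empty)
  match r with
  | (_, _, _, sd, md, ld) =>
    let sr := fmoScanA sd.items (0, "")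
    let smallmost := sr.2 ++ " (" ++ PySem.Int.toStr sr.1 ++ "x" ++ ") "
    let mr := fmoScanA md.items (0, "")
    let mediummost := mr.2 ++ " (" ++ PySem.Int.toStr mr.1 ++ "x" ++ ") "
    let lr := fmoScanA ld.items (0, "")
    let largemost := lr.2 ++ " (" ++ PySem.Int.toStr lr.1 ++ "x" ++ ") "
    ((sd.size : Int), (md.size : Int), (ld.size : Int), smallmost, mediummost, largemost)

-- ===== PORT B =====
-- one bucket's update: count += 1; best replaced only on strictly larger value
def fmoBump (b : Int × String × Int) (word : String) (v : Int) : Int × String × Int :=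
  (b.1 + 1, if v > b.2.2 then (word, v) else b.2)

def fmoStepB (st : (Int × String × Int) × (Int × String × Int) × (Int × String × Int))
    (p : String × Int) : (Int × String × Int) × (Int × String × Int) × (Int × String × Int) :=
  if PySem.Str.len p.1 < 5 then (fmoBump st.1 p.1 p.2, st.2.1, st.2.2)
  else if PySem.Str.len p.1 < 8 then (st.1, fmoBump st.2.1 p.1 p.2, st.2.2)
  else (st.1, st.2.1, fmoBump st.2.2 p.1 p.2)

def fmoFmt (b : Int × String × Int) : String :=
  b.2.1 ++ " (" ++ PySem.Int.toStr b.2.2 ++ "x" ++ ") "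

def finding_most_occurrences_alt (dictionary : List (String × Int)) :
    Int × Int × Int × String × String × String :=
  let st := ((PySem.Dict.ofList dictionary).items).foldl fmoStepB
      ((0, "", 0), (0, "", 0), (0, "", 0))
  (st.1.1, st.2.1.1, st.2.2.1, fmoFmt st.1, fmoFmt st.2.1, fmoFmt st.2.2)

-- ===== PRECONDITION & SPEC =====
def Spec_finding_most_occurrences (dictionary : List (String × Int)) (out : Int × Int × Int × String × String × String) : Prop := out = finding_most_occurrences_alt dictionary
instance (dictionary : List (String × Int)) (out : Int × Int × Int × String × String × String) : Decidable (Spec_finding_most_occurrences dictionary out) := by unfold Spec_finding_most_occurrences; infer_instance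

-- ===== CLAIM (what is proved, stated in full; the proofs are below) =====
def Claim_equal_finding_most_occurrences : Prop := ∀ (dictionary : List (String × Int)), Dom_finding_most_occurrences dictionary → Spec_finding_most_occurrences dictionary (finding_most_occurrences dictionary)

-- ===== LEMMAS AND PROOFS =====

-- the three bucket predicates, as they come out of A's elif chain
def fmoPS (p : String × Int) : Bool := PySem.Str.len p.1 < 5
def fmoPM (p : String × Int) : Bool := !(PySem.Str.len p.1 < 5) && (PySem.Str.len p.1 < 8)
def fmoPL (p : String × Int) : Bool := !(PySem.Str.len p.1 < 5) && !(PySem.Str.len p.1 < 8)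

-- A's building loop, on a list with pairwise-distinct keys all fresh for the three dicts,
-- appends each bucket's filtered items to the corresponding dict.
lemma fmo_buildA (l : List (String × Int)) :
    ∀ (s m g : Int) (sd md ld : PySem.Dict String Int),
    (l.map Prod.fst).Nodup →
    (∀ k ∈ l.map Prod.fst, k ∉ sd.keys ∧ k ∉ md.keys ∧ k ∉ ld.keys) →
    (l.foldl fmoStepA (s, m, g, sd, md, ld)).2.2.2 =
      (PySem.Dict.mk (sd.items ++ l.filter fmoPS),
       PySem.Dict.mk (md.items ++ l.filter fmoPM),
       PySem.Dict.mk (ld.items ++ l.filter fmoPL)) := by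
  induction l with
  | nil =>
    intro s m g sd md ld _ _
    simp
  | cons p t ih =>
    intro s m g sd md ld hnd hfresh
    obtain ⟨w, v⟩ := p
    have hnd' : (w :: t.map Prod.fst).Nodup := by simpa using hnd
    have hw : w ∉ t.map Prod.fst := (List.nodup_cons.mp hnd').1
    have hndt : (t.map Prod.fst).Nodup := (List.nodup_cons.mp hnd').2
    have hwf := hfresh w (by simp)
    rw [List.foldl_cons]
    by_cases h5 : w.length < 5
    · have hc : sd.contains w = false := by
        rw [PySem.Dict.contains_eq_decide_mem_keys]; simpa using hwf.1
      have hins : sd.insert w v = PySem.Dict.mk (sd.items ++ [(w, v)]) :=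
        PySem.Dict.ext (by rw [PySem.Dict.items_insert_of_not_contains sd v hc])
      have hstep : fmoStepA (s, m, g, sd, md, ld) (w, v) =
          (s + v, m, g, PySem.Dict.mk (sd.items ++ [(w, v)]), md, ld) := by
        simp [fmoStepA, h5, hins]
      rw [hstep, ih (s + v) m g _ md ld hndt ?_]
      · simp [fmoPS, fmoPM, fmoPL, h5, List.append_assoc]
      · intro k hk
        refine ⟨?_, (hfresh k (by simp [hk])).2.1, (hfresh k (by simp [hk])).2.2⟩
        have hkw : k ≠ w := fun he => hw (he ▸ hk)
        intro hkm
        rw [PySem.Dict.keys_mk, List.map_append] at hkm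
        rcases List.mem_append.mp hkm with h1 | h1
        · exact (hfresh k (by simp [hk])).1 (by simpa [PySem.Dict.keys] using h1)
        · exact hkw (by simpa using h1)
    · by_cases h8 : w.length < 8
      · have hc : md.contains w = false := by
          rw [PySem.Dict.contains_eq_decide_mem_keys]; simpa using hwf.2.1
        have hins : md.insert w v = PySem.Dict.mk (md.items ++ [(w, v)]) :=
          PySem.Dict.ext (by rw [PySem.Dict.items_insert_of_not_contains md v hc])
        have hstep : fmoStepA (s, m, g, sd, md, ld) (w, v) =
            (s, m + v, g, sd, PySem.Dict.mk (md.items ++ [(w, v)]), ld) := by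
          have h4 : 4 < w.length := by omega
          simp [fmoStepA, h4, h5, h8, hins]
        rw [hstep, ih s (m + v) g sd _ ld hndt ?_]
        · simp [fmoPM, fmoPS, fmoPL, h5, h8, List.append_assoc]
        · intro k hk
          refine ⟨(hfresh k (by simp [hk])).1, ?_, (hfresh k (by simp [hk])).2.2⟩
          have hkw : k ≠ w := fun he => hw (he ▸ hk)
          intro hkm
          rw [PySem.Dict.keys_mk, List.map_append] at hkm
          rcases List.mem_append.mp hkm with h1 | h1
          · exact (hfresh k (by simp [hk])).2.1 (by simpa [PySem.Dict.keys] using h1)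
          · exact hkw (by simpa using h1)
      · have hc : ld.contains w = false := by
          rw [PySem.Dict.contains_eq_decide_mem_keys]; simpa using hwf.2.2
        have hins : ld.insert w v = PySem.Dict.mk (ld.items ++ [(w, v)]) :=
          PySem.Dict.ext (by rw [PySem.Dict.items_insert_of_not_contains ld v hc])
        have hstep : fmoStepA (s, m, g, sd, md, ld) (w, v) =
            (s, m, g + v, sd, md, PySem.Dict.mk (ld.items ++ [(w, v)])) := by
          have h8' : 8 ≤ w.length := Nat.not_lt.mp h8
          simp [fmoStepA, h5, h8, h8', hins]
        rw [hstep, ih s m (g + v) sd md _ hndt ?_]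
        · simp [fmoPL, fmoPS, fmoPM, h5, h8, List.append_assoc]
        · intro k hk
          refine ⟨(hfresh k (by simp [hk])).1, (hfresh k (by simp [hk])).2.1, ?_⟩
          have hkw : k ≠ w := fun he => hw (he ▸ hk)
          intro hkm
          rw [PySem.Dict.keys_mk, List.map_append] at hkm
          rcases List.mem_append.mp hkm with h1 | h1
          · exact (hfresh k (by simp [hk])).2.2 (by simpa [PySem.Dict.keys] using h1)
          · exact hkw (by simpa using h1)

-- B's loop computes, per bucket, the length of the filtered list plus the running best of the filtered list.
lemma fmo_foldB (l : List (String × Int)) :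
    ∀ (st : (Int × String × Int) × (Int × String × Int) × (Int × String × Int)),
    l.foldl fmoStepB st =
      ((st.1.1 + ((l.filter fmoPS).length : Int),
        (l.filter fmoPS).foldl (fun b p => if p.2 > b.2 then p else b) st.1.2),
       (st.2.1.1 + ((l.filter fmoPM).length : Int),
        (l.filter fmoPM).foldl (fun b p => if p.2 > b.2 then p else b) st.2.1.2),
       (st.2.2.1 + ((l.filter fmoPL).length : Int),
        (l.filter fmoPL).foldl (fun b p => if p.2 > b.2 then p else b) st.2.2.2)) := by
  induction l with
  | nil => intro st; simp
  | cons p t ih =>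
    intro st
    rw [List.foldl_cons, ih]
    by_cases h5 : p.1.length < 5
    · simp [fmoStepB, fmoBump, fmoPS, fmoPM, fmoPL, h5]
      ring
    · by_cases h8 : p.1.length < 8
      · simp [fmoStepB, fmoBump, fmoPS, fmoPM, fmoPL, h5, h8]
        ring
      · simp [fmoStepB, fmoBump, fmoPS, fmoPM, fmoPL, h5, h8]
        ring

-- A's (count, word) scan is B's (word, count) scan with the components swapped.
lemma fmo_scan_swap (l : List (String × Int)) :
    ∀ (c : Int) (w : String),
    fmoScanA l (c, w) =
      ((l.foldl (fun b p => if p.2 > b.2 then p else b) (w, c)).2,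
       (l.foldl (fun b p => if p.2 > b.2 then p else b) (w, c)).1) := by
  induction l with
  | nil => intro c w; simp [fmoScanA]
  | cons p t ih =>
    intro c w
    simp only [fmoScanA, List.foldl_cons] at *
    by_cases h : p.2 > c
    · simp [h]; exact ih p.2 p.1
    · simp [h]; exact ih c w

-- ===== VERDICT (by name: the statement is the Claim_ definition above) =====
theorem finding_most_occurrences_spec : Claim_equal_finding_most_occurrences := by
  intro dictionary _
  unfold Spec_finding_most_occurrences finding_most_occurrences finding_most_occurrences_alt
  have hnd : (((PySem.Dict.ofList dictionary).items).map Prod.fst).Nodup := by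
    simpa [PySem.Dict.keys] using
      PySem.Dict.nodup_keys_ofList (κ := String) (ν := Int) dictionary
  have hbuild := fmo_buildA ((PySem.Dict.ofList dictionary).items) 0 0 0
      PySem.Dict.empty PySem.Dict.empty PySem.Dict.empty hnd
      (by intro k _; simp [PySem.Dict.keys_empty])
  simp only [fmo_foldB, hbuild]
  rw [fmo_scan_swap, fmo_scan_swap, fmo_scan_swap]
  simp [fmoFmt, PySem.Dict.size, PySem.Dict.empty]
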